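-- pv_equiv track=rewrite | github.com/Yankee3177/Projects | Other Projects/Abstract Machine.py | inverseAdd
-- ===== SOURCE A (Python) =====
-- def inverseAdd(n):
--     nums = n
--     calc = 0
--     isInverse = False
--     for var in nums:
--         calc = -(var)
--         for num in nums:
--             if num == calc:
--                 isInverse = True
--                 break
--             else:
--                 isInverse = False
--         if isInverse == False:
--             return isInverse
--     return isInverse
-- ===== SOURCE B (Python) =====
-- def inverseAdd(n):
--     nums = n
--     return bool(nums) and set(nums) == {-x for x in nums}
-- ===== Notes on version B (the rewrite author's own statement) =====
-- stated objective: simpler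
-- what changed: Replaced the per-element inner membership scan with building the value set and the negated-value set once and comparing them for set equality (closure under negation), keeping the non-empty guard.
import Mathlib
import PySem

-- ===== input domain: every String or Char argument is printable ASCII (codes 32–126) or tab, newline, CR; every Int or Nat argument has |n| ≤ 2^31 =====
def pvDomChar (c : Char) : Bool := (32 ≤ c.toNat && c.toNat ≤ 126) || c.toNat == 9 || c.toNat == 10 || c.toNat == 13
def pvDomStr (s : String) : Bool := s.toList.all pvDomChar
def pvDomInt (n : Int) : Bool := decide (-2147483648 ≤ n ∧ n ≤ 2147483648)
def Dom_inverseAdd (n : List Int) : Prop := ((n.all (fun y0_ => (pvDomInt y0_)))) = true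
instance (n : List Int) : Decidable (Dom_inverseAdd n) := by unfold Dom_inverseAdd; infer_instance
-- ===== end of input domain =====

-- B replaces A's per-element inner membership scan by one set-equality test (value set vs negated-value set); objective: simpler.

-- ===== PORT A =====
-- inner 'for num in nums: if num == calcv: isInverse = True; break else isInverse = False'
def inverseAddInner (calcv : Int) (nums : List Int) (isInverse : Bool) : Bool :=
  match nums with
  | [] => isInverse
  | num :: rest => if num == calcv then true else inverseAddInner calcv rest false

-- outer 'for var in nums' with the early 'return isInverse' when it is False
def inverseAddOuter (nums : List Int) (rest : List Int) (isInverse : Bool) : Bool :=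
  match rest with
  | [] => isInverse
  | var :: rest' =>
      let calcv := -var
      let isInverse' := inverseAddInner calcv nums isInverse
      if isInverse' == false then isInverse'
      else inverseAddOuter nums rest' isInverse'

def inverseAdd (n : List Int) : Bool :=
  inverseAddOuter n n false

-- ===== PORT B =====
def inverseAdd_alt (n : List Int) : Bool :=
  if n.isEmpty then false
  else PySem.Set.equal (PySem.Set.ofList n) (PySem.Set.ofList (n.map (fun x => -x)))

-- ===== PRECONDITION & SPEC =====
def Spec_inverseAdd (n : List Int) (out : Bool) : Prop := out = inverseAdd_alt n
instance (n : List Int) (out : Bool) : Decidable (Spec_inverseAdd n out) := by unfold Spec_inverseAdd; infer_instance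

-- ===== CLAIM (what is proved, stated in full; the proofs are below) =====
def Claim_equal_inverseAdd : Prop := ∀ (n : List Int), Dom_inverseAdd n → Spec_inverseAdd n (inverseAdd n)

-- ===== LEMMAS AND PROOFS =====

theorem inverseAddInner_false (calcv : Int) (nums : List Int) :
    inverseAddInner calcv nums false = nums.contains calcv := by
  induction nums with
  | nil => rfl
  | cons x xs ih =>
      simp only [inverseAddInner, List.contains_cons, ih]
      by_cases h : x = calcv
      · simp [h]
      · have h' : calcv ≠ x := fun e => h e.symm
        simp [h, h']

theorem inverseAddInner_cons (calcv : Int) (x : Int) (xs : List Int) (b : Bool) :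
    inverseAddInner calcv (x :: xs) b = (x :: xs).contains calcv := by
  simp only [inverseAddInner, List.contains_cons, inverseAddInner_false]
  by_cases h : x = calcv
  · simp [h]
  · have h' : calcv ≠ x := fun e => h e.symm
    simp [h, h']

theorem inverseAddOuter_eq (x : Int) (xs rest : List Int) (b : Bool) :
    inverseAddOuter (x :: xs) rest b =
      if ∀ v ∈ rest, -v ∈ x :: xs then (if rest = [] then b else true) else false := by
  induction rest generalizing b with
  | nil => simp [inverseAddOuter]
  | cons v rest' ih =>
      simp only [inverseAddOuter, inverseAddInner_cons]
      by_cases hv : (-v) ∈ x :: xs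
      · have hc : (x :: xs).contains (-v) = true := by simpa using hv
        rw [hc, show (true == false) = false from rfl, if_neg (by simp), ih]
        by_cases hall : ∀ u ∈ rest', -u ∈ x :: xs
        · have h2 : ∀ u ∈ v :: rest', -u ∈ x :: xs := by
            intro u hu
            rcases List.mem_cons.mp hu with h | h
            · subst h; exact hv
            · exact hall u h
          simp
          exact fun _ => by simpa using hv
        · have hns : ¬ ∀ u ∈ v :: rest', -u ∈ x :: xs := by
            intro h; exact hall (fun u hu => h u (List.mem_cons_of_mem _ hu))
          simp
          exact fun _ => by simpa using hv
      · have hc : (x :: xs).contains (-v) = false := by simpa using hv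
        rw [hc, show (false == false) = true from rfl, if_pos rfl]
        have hns : ¬ ∀ u ∈ v :: rest', -u ∈ x :: xs := by
          intro h; exact hv (h v (List.mem_cons_self ..))
        simp
        intro hcon
        exact absurd (by simpa using hcon : (-v) ∈ x :: xs) hv

theorem inverseAdd_eq_closed (n : List Int) :
    inverseAdd n = (decide (n ≠ []) && decide (∀ v ∈ n, -v ∈ n)) := by
  cases n with
  | nil => rfl
  | cons x xs =>
      show inverseAddOuter (x :: xs) (x :: xs) false = _
      rw [inverseAddOuter_eq]
      by_cases h : ∀ v ∈ x :: xs, -v ∈ x :: xs <;> simp [h]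

theorem set_equal_neg (n : List Int) :
    PySem.Set.equal (PySem.Set.ofList n) (PySem.Set.ofList (n.map (fun x => -x))) =
      decide (∀ v ∈ n, -v ∈ n) := by
  rw [Bool.eq_iff_iff, PySem.Set.equal_iff, decide_eq_true_iff]
  constructor
  · intro hiff v hv
    have := (hiff (-v)).mpr (by
      rw [PySem.Set.mem_ofList, List.mem_map]; exact ⟨v, hv, rfl⟩)
    rwa [PySem.Set.mem_ofList] at this
  · intro h y
    rw [PySem.Set.mem_ofList, PySem.Set.mem_ofList, List.mem_map]
    constructor
    · intro hy; exact ⟨-y, by simpa using h y hy, by ring⟩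
    · rintro ⟨z, hz, rfl⟩; exact h z hz

theorem inverseAdd_alt_eq_closed (n : List Int) :
    inverseAdd_alt n = (decide (n ≠ []) && decide (∀ v ∈ n, -v ∈ n)) := by
  unfold inverseAdd_alt
  cases n with
  | nil => rfl
  | cons x xs =>
      rw [show ((x :: xs).isEmpty) = false from rfl, set_equal_neg]
      simp

-- ===== VERDICT (by name: the statement is the Claim_ definition above) =====
theorem inverseAdd_spec : Claim_equal_inverseAdd := by
  intro n _
  unfold Spec_inverseAdd
  rw [inverseAdd_eq_closed, inverseAdd_alt_eq_closed]
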